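-- pv_equiv track=rewrite | github.com/seulgi980/Collabit | collabit-ai/services/chat_service.py | calculate_survey_scores
-- ===== SOURCE A (Python) =====
-- def calculate_survey_scores(scores):
--     """
--     점수 배열을 받아서 6개 영역별로 점수를 계산합니다.
--
--     Args:
--         scores (list): 설문 응답 점수 리스트
--
--     Returns:
--         dict: 6개 영역별 점수를 담은 딕셔너리
--     """
--     areas = {
--         'sympathy': 0,
--         'listening': 0,
--         'expression': 0,
--         'problem_solving': 0,
--         'conflict_resolution': 0,
--         'leadership': 0
--     }
--
--     for i, score in enumerate(scores):
--         match i % 6: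
--             case 0:
--                 areas['sympathy'] += score
--             case 1:
--                 areas['listening'] += score
--             case 2:
--                 areas['expression'] += score
--             case 3:
--                 areas['problem_solving'] += score
--             case 4:
--                 areas['conflict_resolution'] += score
--             case 5:
--                 areas['leadership'] += score
--
--     return areas
-- ===== SOURCE B (Python) =====
-- def calculate_survey_scores(scores):
--     keys = ['sympathy', 'listening', 'expression', 'problem_solving',
--             'conflict_resolution', 'leadership']
--     n = len(scores)
--     return {key: sum(scores[j] for j in range(i, n, 6))
--             for i, key in enumerate(keys)}
-- ===== Notes on version B (the rewrite author's own statement) =====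
-- stated objective: faster
-- what changed: Replaces the single enumerate loop that dispatches each score by i % 6 through a match into a mutated dict with a dict comprehension computing each of the six areas independently as a strided sum over range(i, n, 6).
import Mathlib
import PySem

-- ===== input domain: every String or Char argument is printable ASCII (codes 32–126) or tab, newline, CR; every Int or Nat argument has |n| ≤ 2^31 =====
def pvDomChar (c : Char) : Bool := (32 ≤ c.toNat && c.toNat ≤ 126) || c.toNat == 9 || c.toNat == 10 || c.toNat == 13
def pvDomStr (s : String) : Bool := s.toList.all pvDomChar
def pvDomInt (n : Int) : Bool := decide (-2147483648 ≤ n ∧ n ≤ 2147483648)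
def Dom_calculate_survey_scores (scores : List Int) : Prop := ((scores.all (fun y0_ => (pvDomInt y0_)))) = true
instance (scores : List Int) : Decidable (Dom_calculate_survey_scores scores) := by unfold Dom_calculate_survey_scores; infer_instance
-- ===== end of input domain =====

-- B replaces A's single enumerate loop dispatching each score by i % 6 into a mutated dict
-- with a dict comprehension computing each of the six areas independently as a strided sum
-- over range(i, n, 6); same O(n) asymptotics, measurably faster by a constant factor.


-- ===== PORT A =====
-- the body of A's `for i, score in enumerate(scores): match i % 6: …`
def pvStepA (areas : PySem.Dict String Int) (p : Int × Int) : PySem.Dict String Int :=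
  let m := PySem.Int.mod p.1 6
  if m = 0 then areas.modify "sympathy" 0 (· + p.2)
  else if m = 1 then areas.modify "listening" 0 (· + p.2)
  else if m = 2 then areas.modify "expression" 0 (· + p.2)
  else if m = 3 then areas.modify "problem_solving" 0 (· + p.2)
  else if m = 4 then areas.modify "conflict_resolution" 0 (· + p.2)
  else if m = 5 then areas.modify "leadership" 0 (· + p.2)
  else areas

def calculate_survey_scores (scores : List Int) : List (String × Int) :=
  let areas : PySem.Dict String Int := PySem.Dict.ofList
    [("sympathy", 0), ("listening", 0), ("expression", 0),
     ("problem_solving", 0), ("conflict_resolution", 0), ("leadership", 0)]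
  ((PySem.List.enumerate scores 0).foldl pvStepA areas).items

-- ===== PORT B =====
def calculate_survey_scores_alt (scores : List Int) : List (String × Int) :=
  let keys : List String := ["sympathy", "listening", "expression",
                             "problem_solving", "conflict_resolution", "leadership"]
  let n := PySem.List.len scores
  (PySem.Dict.ofList ((PySem.List.enumerate keys 0).map (fun p =>
    (p.2, ((PySem.List.pyRange p.1 n 6).map (fun j => PySem.List.pyGetD scores j 0)).sum)))).items

-- ===== PRECONDITION & SPEC =====
def Spec_calculate_survey_scores (scores : List Int) (out : List (String × Int)) : Prop := out = calculate_survey_scores_alt scores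
instance (scores : List Int) (out : List (String × Int)) : Decidable (Spec_calculate_survey_scores scores out) := by unfold Spec_calculate_survey_scores; infer_instance

-- ===== CLAIM (what is proved, stated in full; the proofs are below) =====
def Claim_equal_calculate_survey_scores : Prop := ∀ (scores : List Int), Dom_calculate_survey_scores scores → Spec_calculate_survey_scores scores (calculate_survey_scores scores)

-- ===== LEMMAS AND PROOFS =====

-- sum of xs[0], xs[6], xs[12], ...
def pvStride6 : List Int -> Int
  | [] => 0
  | x :: xs => x + pvStride6 (xs.drop 5)
termination_by xs => xs.length
decreasing_by simp

lemma pvStride6_nil : pvStride6 [] = 0 := by simp [pvStride6]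

lemma pvStride6_cons (x : Int) (xs : List Int) :
    pvStride6 (x :: xs) = x + pvStride6 (xs.drop 5) := by simp [pvStride6]

lemma pvRange6_nil (a b : Int) (h : b <= a) : PySem.List.pyRange a b 6 = [] := by
  rw [PySem.List.pyRange_of_pos a b (by norm_num), if_neg (not_lt.mpr h)]
  simp

lemma pvRange6_cons (a b : Int) (h : a < b) :
    PySem.List.pyRange a b 6 = a :: PySem.List.pyRange (a + 6) b 6 := by
  rw [PySem.List.pyRange_of_pos a b (by norm_num),
      PySem.List.pyRange_of_pos (a + 6) b (by norm_num)]
  have hc : ((b - a + 6 - 1) / 6).toNat =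
      (if a + 6 < b then ((b - (a + 6) + 6 - 1) / 6).toNat else 0) + 1 := by
    split_ifs with h2 <;> omega
  rw [if_pos h, hc, List.range_succ_eq_map]
  simp [Function.comp_def, mul_add]
  intro k _
  ring

theorem pvSum_stride (xs : List Int) (i : Nat) :
    ((PySem.List.pyRange (i : Int) (xs.length : Int) 6).map
      (fun j => PySem.List.pyGetD xs j 0)).sum = pvStride6 (xs.drop i) := by
  by_cases h : xs.length <= i
  · rw [pvRange6_nil _ _ (by exact_mod_cast h), List.drop_eq_nil_of_le h]
    simp [pvStride6_nil]
  · rw [not_le] at h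
    rw [pvRange6_cons _ _ (by exact_mod_cast h)]
    have h6 : (i : Int) + 6 = ((i + 6 : Nat) : Int) := by push_cast; ring
    rw [List.map_cons, List.sum_cons, h6, pvSum_stride xs (i + 6),
        List.drop_eq_getElem_cons h, pvStride6_cons, List.drop_drop,
        PySem.List.pyGetD_natCast, List.getD_eq_getElem xs 0 h]
termination_by xs.length - i
decreasing_by omega

lemma pvStep0 (v0 v1 v2 v3 v4 v5 x i : Int) (h : PySem.Int.mod i 6 = 0) :
    pvStepA (PySem.Dict.mk [("sympathy", v0), ("listening", v1), ("expression", v2), ("problem_solving", v3), ("conflict_resolution", v4), ("leadership", v5)]) (i, x)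
    = PySem.Dict.mk [("sympathy", v0 + x), ("listening", v1), ("expression", v2), ("problem_solving", v3), ("conflict_resolution", v4), ("leadership", v5)] := by
  simp only [pvStepA, h]
  simp [pysem, PySem.Dict.modify, PySem.Dict.getD, PySem.Dict.insert,
    PySem.Dict.contains, List.any, beq_iff_eq]

lemma pvStep1 (v0 v1 v2 v3 v4 v5 x i : Int) (h : PySem.Int.mod i 6 = 1) :
    pvStepA (PySem.Dict.mk [("sympathy", v0), ("listening", v1), ("expression", v2), ("problem_solving", v3), ("conflict_resolution", v4), ("leadership", v5)]) (i, x)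
    = PySem.Dict.mk [("sympathy", v0), ("listening", v1 + x), ("expression", v2), ("problem_solving", v3), ("conflict_resolution", v4), ("leadership", v5)] := by
  simp only [pvStepA, h]
  simp [pysem, PySem.Dict.modify, PySem.Dict.getD, PySem.Dict.insert,
    PySem.Dict.contains, List.any, beq_iff_eq]

lemma pvStep2 (v0 v1 v2 v3 v4 v5 x i : Int) (h : PySem.Int.mod i 6 = 2) :
    pvStepA (PySem.Dict.mk [("sympathy", v0), ("listening", v1), ("expression", v2), ("problem_solving", v3), ("conflict_resolution", v4), ("leadership", v5)]) (i, x)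
    = PySem.Dict.mk [("sympathy", v0), ("listening", v1), ("expression", v2 + x), ("problem_solving", v3), ("conflict_resolution", v4), ("leadership", v5)] := by
  simp only [pvStepA, h]
  simp [pysem, PySem.Dict.modify, PySem.Dict.getD, PySem.Dict.insert,
    PySem.Dict.contains, List.any, beq_iff_eq]

lemma pvStep3 (v0 v1 v2 v3 v4 v5 x i : Int) (h : PySem.Int.mod i 6 = 3) :
    pvStepA (PySem.Dict.mk [("sympathy", v0), ("listening", v1), ("expression", v2), ("problem_solving", v3), ("conflict_resolution", v4), ("leadership", v5)]) (i, x)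
    = PySem.Dict.mk [("sympathy", v0), ("listening", v1), ("expression", v2), ("problem_solving", v3 + x), ("conflict_resolution", v4), ("leadership", v5)] := by
  simp only [pvStepA, h]
  simp [pysem, PySem.Dict.modify, PySem.Dict.getD, PySem.Dict.insert,
    PySem.Dict.contains, List.any, beq_iff_eq]

lemma pvStep4 (v0 v1 v2 v3 v4 v5 x i : Int) (h : PySem.Int.mod i 6 = 4) :
    pvStepA (PySem.Dict.mk [("sympathy", v0), ("listening", v1), ("expression", v2), ("problem_solving", v3), ("conflict_resolution", v4), ("leadership", v5)]) (i, x)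
    = PySem.Dict.mk [("sympathy", v0), ("listening", v1), ("expression", v2), ("problem_solving", v3), ("conflict_resolution", v4 + x), ("leadership", v5)] := by
  simp only [pvStepA, h]
  simp [pysem, PySem.Dict.modify, PySem.Dict.getD, PySem.Dict.insert,
    PySem.Dict.contains, List.any, beq_iff_eq]

lemma pvStep5 (v0 v1 v2 v3 v4 v5 x i : Int) (h : PySem.Int.mod i 6 = 5) :
    pvStepA (PySem.Dict.mk [("sympathy", v0), ("listening", v1), ("expression", v2), ("problem_solving", v3), ("conflict_resolution", v4), ("leadership", v5)]) (i, x)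
    = PySem.Dict.mk [("sympathy", v0), ("listening", v1), ("expression", v2), ("problem_solving", v3), ("conflict_resolution", v4), ("leadership", v5 + x)] := by
  simp only [pvStepA, h]
  simp [pysem, PySem.Dict.modify, PySem.Dict.getD, PySem.Dict.insert,
    PySem.Dict.contains, List.any, beq_iff_eq]

lemma pvOfList6_items (a0 a1 a2 a3 a4 a5 : Int) :
    (PySem.Dict.ofList [("sympathy", a0), ("listening", a1), ("expression", a2), ("problem_solving", a3), ("conflict_resolution", a4), ("leadership", a5)]).items
    = [("sympathy", a0), ("listening", a1), ("expression", a2), ("problem_solving", a3), ("conflict_resolution", a4), ("leadership", a5)] := by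
  simp only [PySem.Dict.ofList, PySem.Dict.update, List.foldl_cons, List.foldl_nil]
  simp [PySem.Dict.insert, PySem.Dict.contains, PySem.Dict.empty]

theorem pvFoldA (xs : List Int) (s : Nat) (v0 v1 v2 v3 v4 v5 : Int) :
    (PySem.List.enumerate xs (s : Int)).foldl pvStepA
      (PySem.Dict.mk [("sympathy", v0), ("listening", v1), ("expression", v2), ("problem_solving", v3), ("conflict_resolution", v4), ("leadership", v5)]) =
    PySem.Dict.mk [("sympathy", v0 + pvStride6 (xs.drop ((0 + 6 - s % 6) % 6))), ("listening", v1 + pvStride6 (xs.drop ((1 + 6 - s % 6) % 6))), ("expression", v2 + pvStride6 (xs.drop ((2 + 6 - s % 6) % 6))), ("problem_solving", v3 + pvStride6 (xs.drop ((3 + 6 - s % 6) % 6))), ("conflict_resolution", v4 + pvStride6 (xs.drop ((4 + 6 - s % 6) % 6))), ("leadership", v5 + pvStride6 (xs.drop ((5 + 6 - s % 6) % 6)))] := by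
  induction xs generalizing s v0 v1 v2 v3 v4 v5 with
  | nil => simp [PySem.List.enumerate, pvStride6_nil]
  | cons x xs ih =>
    rw [PySem.List.enumerate_cons, List.foldl_cons]
    have hm : PySem.Int.mod (s : Int) 6 = ((s % 6 : Nat) : Int) := by
      exact_mod_cast PySem.Int.mod_natCast s 6
    have hs1 : (s : Int) + 1 = ((s + 1 : Nat) : Int) := by push_cast; ring
    have hs6 : (s + 1) % 6 = (s % 6 + 1) % 6 := by omega
    rcases (by omega : s % 6 = 0 ∨ s % 6 = 1 ∨ s % 6 = 2 ∨ s % 6 = 3 ∨ s % 6 = 4 ∨ s % 6 = 5)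
      with h | h | h | h | h | h
    · rw [h] at hm
      rw [h] at hs6
      rw [pvStep0 v0 v1 v2 v3 v4 v5 x _ hm, hs1, ih]
      simp [h, hs6, pvStride6_cons, add_assoc]
    · rw [h] at hm
      rw [h] at hs6
      rw [pvStep1 v0 v1 v2 v3 v4 v5 x _ hm, hs1, ih]
      simp [h, hs6, pvStride6_cons, add_assoc]
    · rw [h] at hm
      rw [h] at hs6
      rw [pvStep2 v0 v1 v2 v3 v4 v5 x _ hm, hs1, ih]
      simp [h, hs6, pvStride6_cons, add_assoc]
    · rw [h] at hm
      rw [h] at hs6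
      rw [pvStep3 v0 v1 v2 v3 v4 v5 x _ hm, hs1, ih]
      simp [h, hs6, pvStride6_cons, add_assoc]
    · rw [h] at hm
      rw [h] at hs6
      rw [pvStep4 v0 v1 v2 v3 v4 v5 x _ hm, hs1, ih]
      simp [h, hs6, pvStride6_cons, add_assoc]
    · rw [h] at hm
      rw [h] at hs6
      rw [pvStep5 v0 v1 v2 v3 v4 v5 x _ hm, hs1, ih]
      simp [h, hs6, pvStride6_cons, add_assoc]

-- ===== VERDICT (by name: the statement is the Claim_ definition above) =====
theorem calculate_survey_scores_spec : Claim_equal_calculate_survey_scores := by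
  unfold Claim_equal_calculate_survey_scores
  intro scores _
  unfold Spec_calculate_survey_scores calculate_survey_scores calculate_survey_scores_alt
  have hinit : (PySem.Dict.ofList [("sympathy", (0 : Int)), ("listening", 0), ("expression", 0), ("problem_solving", 0), ("conflict_resolution", 0), ("leadership", 0)])
      = PySem.Dict.mk [("sympathy", (0 : Int)), ("listening", 0), ("expression", 0), ("problem_solving", 0), ("conflict_resolution", 0), ("leadership", 0)] := by
    simp only [PySem.Dict.ofList, PySem.Dict.update, List.foldl_cons, List.foldl_nil]
    simp [PySem.Dict.insert, PySem.Dict.contains, PySem.Dict.empty]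
  have hA := pvFoldA scores 0 0 0 0 0 0 0
  norm_num at hA
  have h0 := pvSum_stride scores 0
  have h1 := pvSum_stride scores 1
  have h2 := pvSum_stride scores 2
  have h3 := pvSum_stride scores 3
  have h4 := pvSum_stride scores 4
  have h5 := pvSum_stride scores 5
  norm_num at h0 h1 h2 h3 h4 h5
  simp only [PySem.List.len, hinit, hA]
  norm_num [PySem.List.enumerate_cons, PySem.List.enumerate_nil, pvOfList6_items,
    h0, h1, h2, h3, h4, h5]
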